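-- pv_equiv track=rewrite | github.com/Pretty-boy1719/system_analysis_2025 | task1/task.py | map_nodes
-- ===== SOURCE A (Python) =====
-- def map_nodes(edge_list):
--     index_map = {}
--     nodes = []
--     for a, b in edge_list:
--         for node in (a, b):
--             if node not in index_map:
--                 index_map[node] = len(nodes)
--                 nodes.append(node)
--     return index_map, nodes
-- ===== SOURCE B (Python) =====
-- def map_nodes(edge_list):
--     # No hash during dedup: flatten endpoints, dedup by list-membership scan,
--     # then index the resulting node list by enumeration.
--     flat = []
--     for a, b in edge_list:
--         flat.append(a)
--         flat.append(b)
--     nodes = []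
--     for x in flat:
--         if x not in nodes:
--             nodes.append(x)
--     index_map = {x: i for i, x in enumerate(nodes)}
--     return index_map, nodes
-- ===== Notes on version B (the rewrite author's own statement) =====
-- stated objective: alternative
-- what changed: Removes the hash map from deduplication: instead of one interleaved pass growing a dict and a list together, B flattens the endpoints, deduplicates by scanning the growing node list itself (list membership, no dict), and only afterwards builds the index map by enumerating that list.
import Mathlib
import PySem

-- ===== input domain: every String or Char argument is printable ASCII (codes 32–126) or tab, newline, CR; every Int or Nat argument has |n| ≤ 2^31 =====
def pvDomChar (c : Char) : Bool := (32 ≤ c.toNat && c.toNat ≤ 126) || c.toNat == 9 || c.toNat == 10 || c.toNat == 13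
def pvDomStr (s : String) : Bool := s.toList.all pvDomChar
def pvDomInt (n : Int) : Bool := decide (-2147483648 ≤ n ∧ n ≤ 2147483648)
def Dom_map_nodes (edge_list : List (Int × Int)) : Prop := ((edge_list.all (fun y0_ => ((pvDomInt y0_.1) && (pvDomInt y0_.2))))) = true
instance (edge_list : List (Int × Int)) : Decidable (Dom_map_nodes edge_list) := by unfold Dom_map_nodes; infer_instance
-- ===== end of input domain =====

-- B removes the hash from deduplication: flatten endpoints, dedup by scanning the growing node
-- list itself, then enumerate it to build the index map; an alternative (list-scan) algorithm.


-- ===== PORT A =====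
-- literal port: dict → PySem.Dict, inner 'for node in (a, b)' → fold over [a, b]
def map_nodes (edge_list : List (Int × Int)) : (List (Int × Int)) × List Int :=
  let st := edge_list.foldl
    (fun (st : PySem.Dict Int Int × List Int) p =>
      [p.1, p.2].foldl
        (fun st node =>
          if st.1.contains node then st
          else (st.1.insert node (st.2.length : Int), st.2 ++ [node]))
        st)
    (PySem.Dict.empty, [])
  (st.1.items, st.2)

-- ===== PORT B =====
-- phase 1: flatten endpoints; phase 2: dedup by membership in the growing node list (no dict);
-- phase 3: enumerate the node list to build the index map
def map_nodes_alt (edge_list : List (Int × Int)) : (List (Int × Int)) × List Int :=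
  let flat := edge_list.foldl (fun acc p => acc ++ [p.1, p.2]) []
  let nodes := flat.foldl (fun ns x => if ns.contains x then ns else ns ++ [x]) []
  ((PySem.List.enumerate nodes).map (fun q => (q.2, q.1)), nodes)

-- ===== PRECONDITION & SPEC =====
def Spec_map_nodes (edge_list : List (Int × Int)) (out : (List (Int × Int)) × List Int) : Prop := out = map_nodes_alt edge_list
instance (edge_list : List (Int × Int)) (out : (List (Int × Int)) × List Int) : Decidable (Spec_map_nodes edge_list out) := by unfold Spec_map_nodes; infer_instance

-- ===== CLAIM (what is proved, stated in full; the proofs are below) =====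
def Claim_equal_map_nodes : Prop := ∀ (edge_list : List (Int × Int)), Dom_map_nodes edge_list → Spec_map_nodes edge_list (map_nodes edge_list)

-- ===== LEMMAS AND PROOFS =====

/-- the index map B builds from a node list -/
def toMap (ns : List Int) : List (Int × Int) :=
  (PySem.List.enumerate ns).map (fun q => (q.2, q.1))

theorem toMap_keys (ns : List Int) : (toMap ns).map (·.1) = ns := by
  simp [toMap, Function.comp_def, PySem.List.map_snd_enumerate]

theorem toMap_append (ns : List Int) (x : Int) :
    toMap (ns ++ [x]) = toMap ns ++ [(x, (ns.length : Int))] := by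
  simp [toMap, PySem.List.enumerate_append, PySem.List.enumerate_cons]

theorem contains_of_items (d : PySem.Dict Int Int) (ns : List Int) (node : Int)
    (h : d.items = toMap ns) : d.contains node = decide (node ∈ ns) := by
  rw [PySem.Dict.contains_eq_decide_mem_keys]
  have : d.keys = ns := by
    simp only [PySem.Dict.keys, h, toMap_keys]
  rw [this]

/-- one node of A's inner loop preserves the invariant and acts as Set.add on the node list -/
theorem stepOne (d : PySem.Dict Int Int) (ns : List Int) (node : Int)
    (h : d.items = toMap ns) :
    (if d.contains node then (d, ns)
     else (d.insert node (ns.length : Int), ns ++ [node])) =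
      ((if d.contains node then (d, ns)
        else (d.insert node (ns.length : Int), ns ++ [node])).1,
       PySem.Set.add ns node) ∧
    ((if d.contains node then (d, ns)
      else (d.insert node (ns.length : Int), ns ++ [node])).1).items =
      toMap (PySem.Set.add ns node) := by
  rw [contains_of_items d ns node h]
  by_cases hm : node ∈ ns
  · simp [PySem.Set.add, PySem.Set.contains, hm, h]
  · have hc : d.contains node = false := by rw [contains_of_items d ns node h]; simp [hm]
    have hn : ns.contains node = false := by simp [hm]
    simp only [PySem.Set.add, PySem.Set.contains, hn, hm, decide_false, Bool.false_eq_true, if_false]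
    refine ⟨trivial, ?_⟩
    rw [PySem.Dict.items_insert_of_not_contains (h := hc), h, toMap_append]

/-- A's fold keeps items = toMap nodes, and the node list evolves exactly as the Set.add fold -/
theorem loopA : ∀ (es : List (Int × Int)) (d : PySem.Dict Int Int) (ns : List Int),
    d.items = toMap ns →
    (es.foldl
      (fun (st : PySem.Dict Int Int × List Int) p =>
        [p.1, p.2].foldl
          (fun st node =>
            if st.1.contains node then st
            else (st.1.insert node (st.2.length : Int), st.2 ++ [node]))
          st)
      (d, ns)).2 =
      es.foldl (fun s p => PySem.Set.add (PySem.Set.add s p.1) p.2) ns ∧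
    ((es.foldl
      (fun (st : PySem.Dict Int Int × List Int) p =>
        [p.1, p.2].foldl
          (fun st node =>
            if st.1.contains node then st
            else (st.1.insert node (st.2.length : Int), st.2 ++ [node]))
          st)
      (d, ns)).1).items =
      toMap (es.foldl (fun s p => PySem.Set.add (PySem.Set.add s p.1) p.2) ns) := by
  intro es
  induction es with
  | nil => intro d ns h; exact ⟨rfl, h⟩
  | cons p rest ih =>
    intro d ns h
    simp only [List.foldl_cons]
    obtain ⟨ha1, ha2⟩ := stepOne d ns p.1 h
    rw [ha1]
    obtain ⟨hb1, hb2⟩ := stepOne _ (PySem.Set.add ns p.1) p.2 ha2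
    rw [hb1]
    exact ih _ _ hb2

/-- B's membership-scan dedup step is definitionally Set.add -/
theorem dedupStep : (fun (ns : List Int) x => if ns.contains x then ns else ns ++ [x]) =
    PySem.Set.add := by
  funext ns x
  simp [PySem.Set.add, PySem.Set.contains]

/-- B's flatten fold produces the flatMap of the endpoints -/
theorem flatten_eq : ∀ (es : List (Int × Int)) (acc : List Int),
    es.foldl (fun acc p => acc ++ [p.1, p.2]) acc = acc ++ es.flatMap (fun p => [p.1, p.2]) := by
  intro es
  induction es with
  | nil => intro acc; simp
  | cons p rest ih => intro acc; simp [ih]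

theorem flatfold : ∀ (es : List (Int × Int)) (s : List Int),
    (es.flatMap (fun p => [p.1, p.2])).foldl PySem.Set.add s =
      es.foldl (fun s p => PySem.Set.add (PySem.Set.add s p.1) p.2) s := by
  intro es
  induction es with
  | nil => intro s; rfl
  | cons p rest ih => intro s; simp only [List.flatMap_cons, List.foldl_append, List.foldl_cons,
      List.foldl_nil]; exact ih _

-- ===== VERDICT (by name: the statement is the Claim_ definition above) =====
theorem map_nodes_spec : Claim_equal_map_nodes := by
  intro edge_list _
  unfold Spec_map_nodes map_nodes map_nodes_alt
  have h0 : (PySem.Dict.empty : PySem.Dict Int Int).items = toMap [] := rfl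
  obtain ⟨h1, h2⟩ := loopA edge_list PySem.Dict.empty [] h0
  have hnodes : (edge_list.foldl (fun acc p => acc ++ [p.1, p.2]) []).foldl
      (fun (ns : List Int) x => if ns.contains x then ns else ns ++ [x]) [] =
      edge_list.foldl (fun s p => PySem.Set.add (PySem.Set.add s p.1) p.2) [] := by
    rw [dedupStep, flatten_eq, List.nil_append, flatfold]
  simp only [hnodes]
  exact Prod.ext (by rw [h2]; rfl) h1
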